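-- pv_equiv track=rewrite | github.com/christeropda/data-science-nameplot | name.py | split_and_remove_dup
-- ===== SOURCE A (Python) =====
-- def split_and_remove_dup(names, blacklist):
-- 	res = []
--
-- 	for i in names:
-- 		diff = i.split(" ")
-- 		for j in diff:
-- 			if j not in res and j not in blacklist:
-- 				res.append(j)
--
-- 	return res
-- ===== SOURCE B (Python) =====
-- def split_and_remove_dup(names, blacklist):
--     words = [w for name in names for w in name.split(" ")]
--     return [w for i, w in enumerate(words)
--             if w not in blacklist and words.index(w) == i]
-- ===== Notes on version B (the rewrite author's own statement) =====
-- stated objective: alternative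
-- what changed: Replaces A's interleaved check-and-append accumulator loop by a flatten pass followed by a single comprehension that keeps a word via the positional first-occurrence test words.index(w) == i (no result list is consulted or grown during the scan).
import Mathlib
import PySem

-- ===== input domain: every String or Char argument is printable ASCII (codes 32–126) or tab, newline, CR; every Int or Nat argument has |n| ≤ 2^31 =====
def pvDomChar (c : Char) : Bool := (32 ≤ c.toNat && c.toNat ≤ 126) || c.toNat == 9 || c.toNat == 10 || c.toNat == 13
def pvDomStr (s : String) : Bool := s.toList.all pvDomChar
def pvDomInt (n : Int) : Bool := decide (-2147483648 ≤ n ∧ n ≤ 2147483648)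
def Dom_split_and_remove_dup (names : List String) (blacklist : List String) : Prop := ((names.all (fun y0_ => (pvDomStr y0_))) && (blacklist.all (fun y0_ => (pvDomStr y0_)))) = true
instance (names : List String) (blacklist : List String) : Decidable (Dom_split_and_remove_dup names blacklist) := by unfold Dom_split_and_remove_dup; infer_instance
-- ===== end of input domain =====

-- B replaces A's check-and-append accumulator loop by a flatten pass and one comprehension keeping
-- each word via the positional first-occurrence test words.index(w) == i: alternative decomposition.

-- ===== PORT A =====
def split_and_remove_dup (names : List String) (blacklist : List String) : List String :=
  names.foldl (fun res i =>
    ((PySem.Str.split? i " ").getD []).foldl (fun res j =>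
      if !res.contains j && !blacklist.contains j then res ++ [j] else res) res) []

-- ===== PORT B =====
def split_and_remove_dup_alt (names : List String) (blacklist : List String) : List String :=
  let words := names.flatMap (fun name => (PySem.Str.split? name " ").getD [])
  ((PySem.List.enumerate words).filter (fun p =>
      !blacklist.contains p.2 && ((PySem.List.index? words p.2).map (Int.ofNat) == some p.1))).map (·.2)

-- ===== PRECONDITION & SPEC =====
def Spec_split_and_remove_dup (names : List String) (blacklist : List String) (out : List String) : Prop := out = split_and_remove_dup_alt names blacklist
instance (names : List String) (blacklist : List String) (out : List String) : Decidable (Spec_split_and_remove_dup names blacklist out) := by unfold Spec_split_and_remove_dup; infer_instance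

-- ===== CLAIM (what is proved, stated in full; the proofs are below) =====
def Claim_equal_split_and_remove_dup : Prop := ∀ (names : List String) (blacklist : List String), Dom_split_and_remove_dup names blacklist → Spec_split_and_remove_dup names blacklist (split_and_remove_dup names blacklist)

-- ===== LEMMAS AND PROOFS =====

-- A's step function ('append j unless already present or blacklisted') IS Set.add guarded by the blacklist.
theorem stepA_eq (bl : List String) :
    (fun (res : List String) j => if !res.contains j && !bl.contains j then res ++ [j] else res)
    = (fun (s : List String) j => if !bl.contains j then PySem.Set.add s j else s) := by
  funext s j
  by_cases hb : bl.contains j <;>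
    by_cases hs : s.contains j <;>
      simp_all [PySem.Set.add]

-- the outer loop over names with the inner loop over splits is one fold over the flattened word list
theorem foldA_flat (f : List String → String → List String) :
    ∀ (names : List String) (acc : List String),
      names.foldl (fun res i => ((PySem.Str.split? i " ").getD []).foldl f res) acc
        = (names.flatMap (fun name => (PySem.Str.split? name " ").getD [])).foldl f acc := by
  intro names
  induction names with
  | nil => intro acc; rfl
  | cons n ns ih =>
      intro acc
      simp [List.flatMap_cons, List.foldl_append, ih]

-- ordered dedup commutes with filtering
theorem ofList_filter (p : String → Bool) :
    ∀ (xs : List String), PySem.Set.ofList (xs.filter p) = (PySem.Set.ofList xs).filter p := by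
  intro xs
  induction xs using List.reverseRecOn with
  | nil => rfl
  | append_singleton xs x ih =>
      by_cases hp : p x
      · rw [List.filter_append, List.filter_cons_of_pos hp]
        simp only [List.filter_nil]
        rw [PySem.Set.ofList_append_singleton, PySem.Set.ofList_append_singleton, ih]
        by_cases hx : x ∈ xs
        · rw [PySem.Set.add_of_mem (by simp [List.mem_filter, hx, hp, PySem.Set.mem_ofList]),
              PySem.Set.add_of_mem (by simpa [PySem.Set.mem_ofList] using hx)]
        · rw [PySem.Set.add_of_not_mem (by simp [List.mem_filter, hx, PySem.Set.mem_ofList]),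
              PySem.Set.add_of_not_mem (by simpa [PySem.Set.mem_ofList] using hx),
              List.filter_append, List.filter_cons_of_pos hp]
          simp
      · rw [List.filter_append, List.filter_cons_of_neg hp]
        simp only [List.filter_nil, List.append_nil]
        rw [PySem.Set.ofList_append_singleton, ih]
        by_cases hx : x ∈ xs
        · rw [PySem.Set.add_of_mem (by simpa [PySem.Set.mem_ofList] using hx)]
        · rw [PySem.Set.add_of_not_mem (by simpa [PySem.Set.mem_ofList] using hx),
              List.filter_append, List.filter_cons_of_neg hp]
          simp

-- keeping exactly the first occurrence of every word (index? ws w = position) IS ordered dedup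
theorem firstIdx_filter :
    ∀ (ws : List String),
      ((PySem.List.enumerate ws 0).filter
          (fun p => ((PySem.List.index? ws p.2).map (Int.ofNat) == some p.1))).map (·.2)
        = PySem.Set.ofList ws := by
  intro ws
  induction ws using List.reverseRecOn with
  | nil => rfl
  | append_singleton xs x ih =>
      rw [PySem.List.enumerate_append, List.filter_append, PySem.Set.ofList_append_singleton]
      have hpref :
          (PySem.List.enumerate xs 0).filter
              (fun p => ((PySem.List.index? (xs ++ [x]) p.2).map (Int.ofNat) == some p.1))
            = (PySem.List.enumerate xs 0).filter
              (fun p => ((PySem.List.index? xs p.2).map (Int.ofNat) == some p.1)) := by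
        apply List.filter_congr
        intro p hp
        obtain ⟨k, hk, rfl⟩ := (PySem.List.mem_enumerate_iff xs 0 p).1 hp
        rw [PySem.List.index?_append_of_mem [x] (List.getElem_mem hk)]
      rw [hpref, List.map_append, ih]
      by_cases hx : x ∈ xs
      · rw [PySem.Set.add_of_mem (by simpa [PySem.Set.mem_ofList] using hx)]
        have h1 : PySem.List.index? (xs ++ [x]) x = PySem.List.index? xs x :=
          PySem.List.index?_append_of_mem [x] hx
        obtain ⟨k, hk⟩ := Option.isSome_iff_exists.1 ((PySem.List.index?_isSome_iff xs x).2 hx)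
        obtain ⟨hklt, -⟩ := PySem.List.getElem_of_index?_eq_some hk
        have hpa : ((PySem.List.index? (xs ++ [x]) x).map (Int.ofNat)
            == some ((0 : Int) + (xs.length : Int))) = false := by
          rw [h1, hk]
          simp
          omega
        rw [PySem.List.enumerate_cons, PySem.List.enumerate_nil, List.filter_singleton]
        simp only [hpa]
        simp
      · rw [PySem.Set.add_of_not_mem (by simpa [PySem.Set.mem_ofList] using hx)]
        have h1 : PySem.List.index? (xs ++ [x]) x = some xs.length :=
          PySem.List.index?_append_singleton_self xs x hx
        have hpa : ((PySem.List.index? (xs ++ [x]) x).map (Int.ofNat)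
            == some ((0 : Int) + (xs.length : Int))) = true := by
          rw [h1]
          simp
        rw [PySem.List.enumerate_cons, PySem.List.enumerate_nil, List.filter_singleton]
        simp only [hpa]
        simp

-- ===== VERDICT (by name: the statement is the Claim_ definition above) =====
theorem split_and_remove_dup_spec : Claim_equal_split_and_remove_dup := by
  intro names blacklist _
  show split_and_remove_dup names blacklist = split_and_remove_dup_alt names blacklist
  unfold split_and_remove_dup split_and_remove_dup_alt
  rw [stepA_eq blacklist, foldA_flat,
      PySem.List.foldl_if_eq_foldl_filter (fun j => !blacklist.contains j) PySem.Set.add]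
  show PySem.Set.update [] _ = _
  rw [PySem.Set.update_nil_left, ofList_filter]
  set words := names.flatMap (fun name => (PySem.Str.split? name " ").getD []) with hw
  show List.filter (fun j => !blacklist.contains j) (PySem.Set.ofList words)
      = ((PySem.List.enumerate words).filter (fun p =>
          !blacklist.contains p.2 && ((PySem.List.index? words p.2).map (Int.ofNat) == some p.1))).map (·.2)
  rw [← List.filter_filter,
      show (fun p : Int × String => !blacklist.contains p.2)
          = ((fun w => !blacklist.contains w) ∘ (fun p : Int × String => p.2)) from rfl,
      ← List.filter_map, firstIdx_filter]
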